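-- pv_equiv track=rewrite | github.com/Minglarn/NavisCore | backend/send_safety.py | encode_type14
-- ===== SOURCE A (Python) =====
-- def ais_6bit_encode(text):
--     """Encodes text to AIS 6-bit binary string."""
--     res = ""
--     for char in text.upper():
--         c = ord(char)
--         if c < 32: val = 0
--         elif c < 64: val = c
--         elif c < 96: val = c - 64
--         else: val = 0
--         res += f"{val:06b}"
--     return res
--
-- def encode_type14(mmsi, text):
--     """Creates a raw NMEA Type 14 sentence."""
--     bits = f"{14:06b}00{mmsi:030b}00"
--     bits += ais_6bit_encode(text)
--     padding = (6 - (len(bits) % 6)) % 6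
--     bits += "0" * padding
--     payload = ""
--     for i in range(0, len(bits), 6):
--         val = int(bits[i:i+6], 2)
--         if val < 40: payload += chr(val + 48)
--         else: payload += chr(val + 56)
--     return f"!AIVDM,1,1,,A,{payload},{padding}"
-- ===== SOURCE B (Python) =====
-- def encode_type14(mmsi, text):
--     """Creates a raw NMEA Type 14 sentence using an integer bit-accumulator."""
--     acc, n = 14, 6                                        # message type 14, 6 bits
--     acc, n = acc << 2, n + 2                              # repeat indicator, 2 bits
--     acc, n = (acc << 30) | (mmsi & 0x3FFFFFFF), n + 30    # 30-bit MMSI field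
--     acc, n = acc << 2, n + 2                              # spare, 2 bits
--     for ch in text.upper():
--         c = ord(ch)
--         v = c % 64 if 32 <= c < 96 else 0
--         acc, n = (acc << 6) | v, n + 6
--     padding = (6 - n % 6) % 6
--     acc, n = acc << padding, n + padding
--     payload = "".join(
--         chr(v + 48) if (v := (acc >> (n - 6 * (i + 1))) & 63) < 40 else chr(v + 56)
--         for i in range(n // 6))
--     return f"!AIVDM,1,1,,A,{payload},{padding}"
-- ===== Notes on version B (the rewrite author's own statement) =====
-- stated objective: alternative
-- what changed: B replaces A's intermediate binary string (built character-by-character and re-parsed chunk-wise with int(_,2)) by a single integer bit-accumulator: fields are pushed with shift-and-or and payload characters are extracted by shift-and-mask, so no bit string is ever materialised or parsed; Pre_ excludes negative mmsi, on which A raises ValueError.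
-- intended difference: On mmsi >= 2**30 (not a representable 30-bit MMSI) A's f"{mmsi:030b}" silently widens the MMSI field beyond the 30 bits the AIS format allots, misaligning every later field and the padding count; B masks the MMSI to 30 bits as the format prescribes, which is the intended behaviour. — e.g. on encode_type14(1073741824, ""): A returns "!AIVDM,1,1,,A,>800000,1", B returns "!AIVDM,1,1,,A,>000000,2"
import Mathlib
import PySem

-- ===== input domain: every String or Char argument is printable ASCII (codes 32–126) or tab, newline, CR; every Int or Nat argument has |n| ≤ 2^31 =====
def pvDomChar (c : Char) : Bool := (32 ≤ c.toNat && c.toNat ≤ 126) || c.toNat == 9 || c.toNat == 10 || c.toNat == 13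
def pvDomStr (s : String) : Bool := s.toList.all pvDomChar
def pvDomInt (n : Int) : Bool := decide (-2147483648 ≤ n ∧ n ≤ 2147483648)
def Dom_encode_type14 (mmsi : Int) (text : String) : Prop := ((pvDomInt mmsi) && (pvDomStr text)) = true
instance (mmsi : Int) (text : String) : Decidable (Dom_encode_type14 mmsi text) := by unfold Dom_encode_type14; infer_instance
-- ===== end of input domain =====

-- B replaces A's binary-string building with an integer bit-accumulator (shift/or pushes,
-- 6-bit extraction by shift-and-mask); B masks the MMSI to the format's 30-bit field,
-- intentionally differing from A on mmsi ≥ 2^30 (D_ below).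

-- ===== PORT A =====

/-- Binary digits of `n`, most significant first (empty for 0): hand port of the digit part
of Python's `format(n, 'b')`, exact for `n ≥ 0` (Pre_ admits only nonnegative `mmsi`). -/
def pvBinDigitsAux : Nat → Nat → List Char
  | _, 0 => []
  | 0, _ + 1 => []      -- never reached: the fuel is an upper bound on the argument
  | fuel + 1, n + 1 => pvBinDigitsAux fuel ((n + 1) / 2) ++ [if (n + 1) % 2 = 1 then '1' else '0']

def pvBinDigits (n : Nat) : List Char := pvBinDigitsAux n n

/-- `f"{n:0{w}b}"` for `n ≥ 0`: binary digits left-padded with '0' to width `w` (hand port, exact for `n ≥ 0`). -/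
def pvBinFmt (w n : Nat) : List Char :=
  let d := if n = 0 then ['0'] else pvBinDigits n
  List.replicate (w - d.length) '0' ++ d

/-- A's per-character branch chain (`if c < 32 … elif c < 64 … elif c < 96 … else 0`). -/
def pvCharVal (c : Char) : Nat :=
  if c.toNat < 32 then 0
  else if c.toNat < 64 then c.toNat
  else if c.toNat < 96 then c.toNat - 64
  else 0

/-- Port of `ais_6bit_encode`: fold over the uppercased text appending 6-bit fields. -/
def pvAis6bitEncode (text : List Char) : List Char :=
  (PySem.Chars.upper text).foldl (fun res ch => res ++ pvBinFmt 6 (pvCharVal ch)) []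

/-- `int(s, 2)` on a string of '0'/'1' characters (A only parses such chunks). -/
def pvBinVal (bs : List Char) : Nat :=
  bs.foldl (fun a c => 2 * a + (if c = '1' then 1 else 0)) 0

/-- A's payload loop `for i in range(0, len(bits), 6)`: one character per 6-bit chunk. -/
def pvPayloadAux : Nat → List Char → List Char
  | _, [] => []
  | 0, _ :: _ => []     -- never reached: the fuel is an upper bound on the length
  | fuel + 1, b :: bs =>
      (if pvBinVal ((b :: bs).take 6) < 40 then Char.ofNat (pvBinVal ((b :: bs).take 6) + 48)
       else Char.ofNat (pvBinVal ((b :: bs).take 6) + 56)) :: pvPayloadAux fuel (bs.drop 5)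

def pvPayloadA (bs : List Char) : List Char := pvPayloadAux bs.length bs

def encode_type14 (mmsi : Int) (text : String) : String :=
  let bits := pvBinFmt 6 14 ++ ['0', '0'] ++ pvBinFmt 30 mmsi.toNat ++ ['0', '0'] ++ pvAis6bitEncode text.toList
  let padding := (6 - bits.length % 6) % 6
  let bits := bits ++ List.replicate padding '0'
  "!AIVDM,1,1,,A," ++ String.ofList (pvPayloadA bits) ++ "," ++ PySem.Int.toStr (padding : Int)

-- ===== PORT B =====

/-- `acc, n = (acc << w) | v, n + w` -/
def pvPush (st : Nat × Nat) (v : Nat) (w : Nat) : Nat × Nat := ((st.1 <<< w) ||| v, st.2 + w)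

def encode_type14_alt (mmsi : Int) (text : String) : String :=
  let st : Nat × Nat := (14, 6)                                    -- message type, 6 bits
  let st := pvPush st 0 2                                          -- repeat indicator
  let st := pvPush st (PySem.Int.band mmsi 1073741823).toNat 30    -- 30-bit MMSI field
  let st := pvPush st 0 2                                          -- spare
  let st := (PySem.Chars.upper text.toList).foldl
      (fun st ch => pvPush st (if 32 ≤ ch.toNat ∧ ch.toNat < 96 then ch.toNat % 64 else 0) 6) st
  let padding := (6 - st.2 % 6) % 6
  let acc := st.1 <<< padding
  let n := st.2 + padding
  let payload := (List.range (n / 6)).map (fun i =>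
      let v := (acc >>> (n - 6 * (i + 1))) &&& 63
      if v < 40 then Char.ofNat (v + 48) else Char.ofNat (v + 56))
  "!AIVDM,1,1,,A," ++ String.ofList payload ++ "," ++ PySem.Int.toStr (padding : Int)

-- ===== PRECONDITION & SPEC =====

-- A raises ValueError on negative mmsi: the '-' sign of f"{mmsi:030b}" lands inside a
-- 6-character chunk handed to int(_, 2); Pre_ excludes exactly those inputs.
def Pre_encode_type14 (mmsi : Int) (text : String) : Prop := 0 ≤ mmsi
instance (mmsi : Int) (text : String) : Decidable (Pre_encode_type14 mmsi text) := by
  unfold Pre_encode_type14; infer_instance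

def pvWitness_encode_type14 : Int × String := (366123456, "SOS")

-- On mmsi ≥ 2^30 (not a representable 30-bit MMSI) A's f"{mmsi:030b}" silently widens the MMSI
-- field beyond the 30 bits the AIS format allots, misaligning every later field and the padding
-- count; B masks the MMSI to 30 bits as the format prescribes, which is the intended behaviour.
def D_encode_type14 (mmsi : Int) (text : String) : Prop := 2 ^ 30 ≤ mmsi
instance (mmsi : Int) (text : String) : Decidable (D_encode_type14 mmsi text) := by
  unfold D_encode_type14; infer_instance

def Spec_encode_type14 (mmsi : Int) (text : String) (out : String) : Prop :=
  ¬ D_encode_type14 mmsi text → out = encode_type14_alt mmsi text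
instance (mmsi : Int) (text : String) (out : String) : Decidable (Spec_encode_type14 mmsi text out) := by unfold Spec_encode_type14; infer_instance

def pvDiffWitness_encode_type14 : Int × String := (1073741824, "")
def pvDiffWitnessOut_encode_type14 : String × String :=
  ("!AIVDM,1,1,,A,>800000,1", "!AIVDM,1,1,,A,>000000,2")

-- ===== CLAIM (what is proved, stated in full; the proofs are below) =====
def Claim_unchanged_encode_type14 : Prop := ∀ (mmsi : Int) (text : String), Dom_encode_type14 mmsi text → Pre_encode_type14 mmsi text → Spec_encode_type14 mmsi text (encode_type14 mmsi text)
def Claim_changed_encode_type14 : Prop := Dom_encode_type14 (pvDiffWitness_encode_type14.1) (pvDiffWitness_encode_type14.2) ∧ Pre_encode_type14 (pvDiffWitness_encode_type14.1) (pvDiffWitness_encode_type14.2) ∧ D_encode_type14 (pvDiffWitness_encode_type14.1) (pvDiffWitness_encode_type14.2) ∧ encode_type14 (pvDiffWitness_encode_type14.1) (pvDiffWitness_encode_type14.2) = pvDiffWitnessOut_encode_type14.1 ∧ encode_type14_alt (pvDiffWitness_encode_type14.1) (pvDiffWitness_encode_type14.2) = pvDiffWitnessOut_encode_type14.2 ∧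 pvDiffWitnessOut_encode_type14.1 ≠ pvDiffWitnessOut_encode_type14.2
def Claim_exact_encode_type14 : Prop := ∀ (mmsi : Int) (text : String), Dom_encode_type14 mmsi text → Pre_encode_type14 mmsi text → D_encode_type14 mmsi text → encode_type14 mmsi text ≠ encode_type14_alt mmsi text
-- ===== LEMMAS AND PROOFS =====

lemma pvBinVal_foldl : ∀ (bs : List Char) (a : Nat),
    bs.foldl (fun a c => 2 * a + (if c = '1' then 1 else 0)) a
      = a * 2 ^ bs.length + pvBinVal bs
  | [], a => by simp [pvBinVal]
  | x :: t, a => by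
      have h1 := pvBinVal_foldl t (2 * a + (if x = '1' then 1 else 0))
      have h2 := pvBinVal_foldl t (2 * 0 + (if x = '1' then 1 else 0))
      simp only [pvBinVal, List.foldl_cons, List.length_cons] at *
      rw [h1, h2, pow_succ]; ring

lemma pvBinVal_append (xs ys : List Char) :
    pvBinVal (xs ++ ys) = pvBinVal xs * 2 ^ ys.length + pvBinVal ys := by
  rw [pvBinVal, List.foldl_append]
  exact pvBinVal_foldl ys (pvBinVal xs)

lemma pvBinVal_lt (bs : List Char) : pvBinVal bs < 2 ^ bs.length := by
  cases bs with
  | nil => simp [pvBinVal]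
  | cons x t =>
      have h := pvBinVal_foldl t (2 * 0 + (if x = '1' then 1 else 0))
      have hlt := pvBinVal_lt t
      simp only [pvBinVal, List.foldl_cons, List.length_cons] at *
      rw [h, pow_succ]
      split <;> omega
termination_by bs.length

lemma pvBinVal_replicate (k : Nat) : pvBinVal (List.replicate k '0') = 0 := by
  induction k with
  | zero => simp [pvBinVal]
  | succ k ih =>
      have h := pvBinVal_foldl (List.replicate k '0') (2 * 0 + (if '0' = '1' then 1 else 0))
      simp only [pvBinVal, List.replicate_succ, List.foldl_cons] at *
      rw [h, ih]; simp

lemma pvBinDigitsAux_fuel : ∀ (f n : Nat), n ≤ f → pvBinDigitsAux f n = pvBinDigits n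
  | _, 0, _ => by cases ‹Nat› <;> rfl
  | f + 1, n + 1, h => by
      have h1 : (n + 1) / 2 ≤ f := by omega
      have h2 : (n + 1) / 2 ≤ n := by omega
      show pvBinDigitsAux f ((n + 1) / 2) ++ _ = pvBinDigitsAux (n + 1) (n + 1)
      rw [pvBinDigitsAux_fuel f ((n + 1) / 2) h1]
      show _ = pvBinDigitsAux n ((n + 1) / 2) ++ _
      rw [pvBinDigitsAux_fuel n ((n + 1) / 2) h2]

lemma pvBinDigits_succ (m : Nat) :
    pvBinDigits (m + 1)
      = pvBinDigits ((m + 1) / 2) ++ [if (m + 1) % 2 = 1 then '1' else '0'] := by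
  show pvBinDigitsAux m ((m + 1) / 2) ++ _ = _
  rw [pvBinDigitsAux_fuel m ((m + 1) / 2) (by omega)]

lemma pvBinDigits_spec (n : Nat) :
    pvBinVal (pvBinDigits n) = n ∧ (pvBinDigits n).length = PySem.Int.bitLength (n : Int) := by
  induction n using Nat.strong_induction_on with
  | _ n ih =>
    match n with
    | 0 => exact ⟨by decide, by decide⟩
    | m + 1 =>
      have h := ih ((m + 1) / 2) (by omega)
      rw [pvBinDigits_succ]
      refine ⟨?_, ?_⟩
      · rw [pvBinVal_append, h.1]
        have hb : pvBinVal [if (m + 1) % 2 = 1 then '1' else '0'] = (m + 1) % 2 := by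
          split <;> simp_all [pvBinVal]
        rw [hb]; simp only [List.length_singleton, pow_one]
        omega
      · rw [List.length_append, h.2, PySem.Int.bitLength_natCast (Nat.succ_pos m)]
        simp

lemma pvBitLength_le {v k : Nat} (h : v < 2 ^ k) : PySem.Int.bitLength (v : Int) ≤ k := by
  rcases Nat.eq_zero_or_pos v with h0 | h0
  · subst h0; simp [PySem.Int.bitLength_zero]
  · have h2 := PySem.Int.two_pow_bitLength_le (v : Int) (by exact_mod_cast h0.ne')
    rw [Int.natAbs_natCast] at h2
    have h3 : (2 : Nat) ^ (PySem.Int.bitLength (v : Int) - 1) < 2 ^ k := lt_of_le_of_lt h2 h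
    have h4 := (Nat.pow_lt_pow_iff_right (by norm_num : 1 < 2)).mp h3
    omega

lemma pvBinFmt_val (w v : Nat) : pvBinVal (pvBinFmt w v) = v := by
  simp only [pvBinFmt]
  rw [pvBinVal_append, pvBinVal_replicate]
  split
  · simp_all [pvBinVal]
  · simp [(pvBinDigits_spec v).1]

lemma pvBinFmt_len (w v : Nat) (hw : 1 ≤ w) :
    (pvBinFmt w v).length = max w (PySem.Int.bitLength (v : Int)) := by
  simp only [pvBinFmt]
  split
  · subst ‹v = 0›
    simp [PySem.Int.bitLength_zero]; omega
  · simp only [List.length_append, List.length_replicate, (pvBinDigits_spec v).2]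
    omega

lemma pvOrShift {m : Nat} (a : Nat) {k : Nat} (h : m < 2 ^ k) :
    (a <<< k) ||| m = a * 2 ^ k + m := by
  rw [← Nat.shiftLeft_add_eq_or_of_lt h, Nat.shiftLeft_eq]

lemma pvCharVal_eq (c : Char) :
    (if 32 ≤ c.toNat ∧ c.toNat < 96 then c.toNat % 64 else 0) = pvCharVal c := by
  unfold pvCharVal
  split_ifs <;> omega

lemma pvCharVal_lt (c : Char) : pvCharVal c < 64 := by
  unfold pvCharVal; split_ifs <;> omega

lemma pvEnc6_len (c : Char) : (pvBinFmt 6 (pvCharVal c)).length = 6 := by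
  rw [pvBinFmt_len 6 _ (by omega)]
  have := pvBitLength_le (v := pvCharVal c) (k := 6) (by simpa using pvCharVal_lt c)
  omega

lemma pvPush_char (bs : List Char) (c : Char) :
    pvPush (pvBinVal bs, bs.length) (if 32 ≤ c.toNat ∧ c.toNat < 96 then c.toNat % 64 else 0) 6
      = (pvBinVal (bs ++ pvBinFmt 6 (pvCharVal c)), (bs ++ pvBinFmt 6 (pvCharVal c)).length) := by
  simp only [pvPush, pvCharVal_eq]
  have hv : pvCharVal c < 2 ^ 6 := by simpa using pvCharVal_lt c
  rw [pvOrShift _ hv, pvBinVal_append, pvBinFmt_val, pvEnc6_len, List.length_append, pvEnc6_len]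

lemma pvFoldB_text : ∀ (cs : List Char) (bs : List Char),
    cs.foldl (fun st ch => pvPush st (if 32 ≤ ch.toNat ∧ ch.toNat < 96 then ch.toNat % 64 else 0) 6)
        (pvBinVal bs, bs.length)
      = (pvBinVal (bs ++ cs.flatMap (fun c => pvBinFmt 6 (pvCharVal c))),
         (bs ++ cs.flatMap (fun c => pvBinFmt 6 (pvCharVal c))).length)
  | [], bs => by simp
  | c :: t, bs => by
      rw [List.foldl_cons, pvPush_char bs c, pvFoldB_text t (bs ++ pvBinFmt 6 (pvCharVal c))]
      simp [List.append_assoc]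

lemma pvAnd63 (x : Nat) : x &&& 63 = x % 64 := by
  have : (63 : Nat) = 2 ^ 6 - 1 := rfl
  rw [this, Nat.and_two_pow_sub_one_eq_mod]

lemma pvPayloadAux_irrel : ∀ (f1 f2 : Nat) (bs : List Char), bs.length ≤ f1 → bs.length ≤ f2 →
    pvPayloadAux f1 bs = pvPayloadAux f2 bs
  | f1, f2, [], _, _ => by cases f1 <;> cases f2 <;> rfl
  | 0, _, _ :: _, h1, _ => by simp at h1
  | _ + 1, 0, _ :: _, _, h2 => by simp at h2
  | g1 + 1, g2 + 1, b :: t, h1, h2 => by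
      simp only [pvPayloadAux]
      rw [pvPayloadAux_irrel g1 g2 (t.drop 5)
        (by simp [List.length_drop]; simp at h1; omega)
        (by simp [List.length_drop]; simp at h2; omega)]

lemma pvPayloadA_cons (bs : List Char) (hne : bs ≠ []) :
    pvPayloadA bs
      = (if pvBinVal (bs.take 6) < 40 then Char.ofNat (pvBinVal (bs.take 6) + 48)
         else Char.ofNat (pvBinVal (bs.take 6) + 56)) :: pvPayloadA (bs.drop 6) := by
  obtain ⟨b, t, rfl⟩ := List.exists_cons_of_ne_nil hne
  have hd : (b :: t).drop 6 = t.drop 5 := rfl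
  show pvPayloadAux (b :: t).length (b :: t) = _
  simp only [List.length_cons, pvPayloadAux, pvPayloadA, hd]
  rw [pvPayloadAux_irrel t.length (t.drop 5).length (t.drop 5)
    (by simp [List.length_drop]) (le_refl _)]

lemma pvPayload_eq : ∀ (k : Nat) (bs : List Char), bs.length = 6 * k →
    pvPayloadA bs = (List.range k).map (fun i =>
      if (pvBinVal bs >>> (6 * k - 6 * (i + 1))) &&& 63 < 40
      then Char.ofNat (((pvBinVal bs >>> (6 * k - 6 * (i + 1))) &&& 63) + 48)
      else Char.ofNat (((pvBinVal bs >>> (6 * k - 6 * (i + 1))) &&& 63) + 56))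
  | 0, bs, h => by
      have hnil : bs = [] := List.length_eq_zero_iff.mp (by omega)
      subst hnil
      rfl
  | k + 1, bs, h => by
      have hne : bs ≠ [] := by intro e; subst e; simp at h
      have hu : (bs.take 6).length = 6 := by
        simp only [List.length_take]; omega
      have hr : (bs.drop 6).length = 6 * k := by
        simp only [List.length_drop]; omega
      have hsplit : bs.take 6 ++ bs.drop 6 = bs := List.take_append_drop 6 _
      have hval : pvBinVal bs
          = pvBinVal (bs.take 6) * 2 ^ (6 * k) + pvBinVal (bs.drop 6) := by
        conv_lhs => rw [← hsplit]
        rw [pvBinVal_append, hr]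
      have hu_lt : pvBinVal (bs.take 6) < 64 := by
        have := pvBinVal_lt (bs.take 6); rw [hu] at this; exact this
      have hr_lt : pvBinVal (bs.drop 6) < 2 ^ (6 * k) := by
        have := pvBinVal_lt (bs.drop 6); rw [hr] at this; exact this
      rw [pvPayloadA_cons bs hne, List.range_succ_eq_map, List.map_cons, List.map_map]
      have hhead : (pvBinVal bs >>> (6 * (k + 1) - 6 * (0 + 1))) &&& 63
          = pvBinVal (bs.take 6) := by
        have h1 : 6 * (k + 1) - 6 * (0 + 1) = 6 * k := by omega
        rw [h1, pvAnd63, Nat.shiftRight_eq_div_pow, hval]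
        rw [Nat.add_comm, Nat.add_mul_div_right _ _ (Nat.two_pow_pos _),
            Nat.div_eq_of_lt hr_lt, Nat.zero_add, Nat.mod_eq_of_lt hu_lt]
      have htail : pvPayloadA (bs.drop 6)
          = (List.range k).map ((fun i =>
              if (pvBinVal bs >>> (6 * (k + 1) - 6 * (i + 1))) &&& 63 < 40
              then Char.ofNat (((pvBinVal bs >>> (6 * (k + 1) - 6 * (i + 1))) &&& 63) + 48)
              else Char.ofNat (((pvBinVal bs >>> (6 * (k + 1) - 6 * (i + 1))) &&& 63) + 56)) ∘ Nat.succ) := by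
        rw [pvPayload_eq k _ hr]
        refine List.map_congr_left (fun i hi => ?_)
        have hik : i < k := List.mem_range.mp hi
        have hshift : (pvBinVal bs >>> (6 * (k + 1) - 6 * (Nat.succ i + 1))) &&& 63
            = (pvBinVal (bs.drop 6) >>> (6 * k - 6 * (i + 1))) &&& 63 := by
          have hj : 6 * (k + 1) - 6 * (Nat.succ i + 1) = 6 * k - 6 * (i + 1) := by omega
          rw [hj, pvAnd63, pvAnd63, Nat.shiftRight_eq_div_pow, Nat.shiftRight_eq_div_pow, hval]
          have hle : 6 * (i + 1) ≤ 6 * k := by omega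
          have hpow : (2 : Nat) ^ (6 * k)
              = 64 * 2 ^ (6 * (i + 1) - 6) * 2 ^ (6 * k - 6 * (i + 1)) := by
            rw [show (64 : Nat) = 2 ^ 6 from rfl, ← pow_add, ← pow_add]
            congr 1; omega
          rw [Nat.add_comm, hpow, ← Nat.mul_assoc,
              Nat.add_mul_div_right _ _ (Nat.two_pow_pos _),
              Nat.mul_comm (64 : Nat) (2 ^ (6 * (i + 1) - 6)), ← Nat.mul_assoc,
              Nat.add_mul_mod_self_right]
        simp only [Function.comp, hshift]
      rw [hhead, htail]

-- header abbreviation for the proof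
def pvHeader (m : Nat) : List Char :=
  pvBinFmt 6 14 ++ ['0', '0'] ++ pvBinFmt 30 m ++ ['0', '0']

lemma pvD0 : pvBinVal ['0', '0'] = 0 := by simp [pvBinVal]

lemma pvHeader_spec (m : Nat) :
    pvBinVal (pvHeader m) = (14 * 2 ^ 2 * 2 ^ (pvBinFmt 30 m).length + m) * 2 ^ 2
      ∧ (pvHeader m).length = 6 + 2 + (pvBinFmt 30 m).length + 2 := by
  constructor
  · simp only [pvHeader, List.append_assoc, pvBinVal_append, List.length_append,
      List.length_cons, List.length_nil, pvD0, pvBinFmt_val]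
    ring
  · simp only [pvHeader, List.length_append, List.length_cons, List.length_nil,
      pvBinFmt_len 6 14 (by omega)]
    have h14 : PySem.Int.bitLength ((14 : Nat) : Int) = 4 := by decide
    rw [h14]; omega

lemma pvHead_push (m : Nat) (hm : m < 2 ^ 30) :
    pvPush (pvPush (pvPush (14, 6) 0 2) (PySem.Int.band (m : Int) 1073741823).toNat 30) 0 2
      = (pvBinVal (pvHeader m), (pvHeader m).length) := by
  have hband : (PySem.Int.band (m : Int) 1073741823).toNat = m := by
    have h1 : PySem.Int.band (m : Int) ((1073741823 : Nat) : Int) = ((m &&& 1073741823 : Nat) : Int) :=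
      PySem.Int.band_natCast m 1073741823
    have h2 : m &&& 1073741823 = m % 2 ^ 30 := by
      have : (1073741823 : Nat) = 2 ^ 30 - 1 := by norm_num
      rw [this, Nat.and_two_pow_sub_one_eq_mod]
    have h3 : m % 2 ^ 30 = m := Nat.mod_eq_of_lt hm
    rw [show ((1073741823 : Int)) = ((1073741823 : Nat) : Int) by norm_num, h1, h2, h3]
    simp
  have hlen : (pvBinFmt 30 m).length = 30 := by
    rw [pvBinFmt_len 30 m (by omega)]
    have := pvBitLength_le (v := m) (k := 30) hm
    omega
  simp only [pvPush, Nat.or_zero, hband]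
  rw [pvOrShift _ (by simpa using hm)]
  simp only [Prod.mk.injEq]
  refine ⟨?_, ?_⟩
  · rw [(pvHeader_spec m).1, hlen]
    simp only [Nat.shiftLeft_eq]
  · rw [(pvHeader_spec m).2, hlen]

lemma pvMain (m : Nat) (text : String) (hm : m < 2 ^ 30) :
    encode_type14 (m : Int) text = encode_type14_alt (m : Int) text := by
  have hH : pvBinFmt 6 14 ++ ['0', '0'] ++ pvBinFmt 30 m ++ ['0', '0'] = pvHeader m := rfl
  simp only [encode_type14, encode_type14_alt, Int.toNat_natCast, pvAis6bitEncode,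
    PySem.List.foldl_append_eq_flatMap, List.nil_append]
  rw [pvHead_push m hm, pvFoldB_text (PySem.Chars.upper text.toList) (pvHeader m), hH]
  dsimp only
  set E := (PySem.Chars.upper text.toList).flatMap (fun c => pvBinFmt 6 (pvCharVal c)) with hE
  set L := (pvHeader m ++ E).length with hL
  set pad := (6 - L % 6) % 6 with hpad
  have h6 : (L + pad) % 6 = 0 := by omega
  set k := (L + pad) / 6 with hk
  have hk6 : L + pad = 6 * k := by omega
  have hlen' : (pvHeader m ++ E ++ List.replicate pad '0').length = 6 * k := by
    simp only [List.length_append, List.length_replicate, ← hL]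
    omega
  have hval' : pvBinVal (pvHeader m ++ E ++ List.replicate pad '0')
      = pvBinVal (pvHeader m ++ E) <<< pad := by
    rw [pvBinVal_append, pvBinVal_replicate, List.length_replicate, Nat.shiftLeft_eq, Nat.add_zero]
  rw [pvPayload_eq k _ hlen']
  simp only [hval', hk6]

-- the fold only ever adds 6 to the bit count, whatever the accumulator holds
lemma pvFoldB_len : ∀ (cs : List Char) (st : Nat × Nat),
    (cs.foldl (fun st ch => pvPush st (if 32 ≤ ch.toNat ∧ ch.toNat < 96 then ch.toNat % 64 else 0) 6) st).2
      = st.2 + 6 * cs.length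
  | [], st => by simp
  | c :: t, st => by
      rw [List.foldl_cons, pvFoldB_len t]
      simp [pvPush]; omega

lemma pvEnc_len (cs : List Char) :
    (pvAis6bitEncode cs).length = 6 * (PySem.Chars.upper cs).length := by
  rw [pvAis6bitEncode, PySem.List.foldl_append_eq_flatMap, List.nil_append]
  induction PySem.Chars.upper cs with
  | nil => rfl
  | cons c t ih => simp [List.flatMap_cons, pvEnc6_len, ih]; omega

lemma pvLastChar (s : String) (pl : List Char) (p : Int) (d : Char)
    (h : (PySem.Int.toStr p).toList = [d]) :
    (s ++ String.ofList pl ++ "," ++ PySem.Int.toStr p).toList.getLast? = some d := by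
  have : (s ++ String.ofList pl ++ "," ++ PySem.Int.toStr p).toList
      = (s.toList ++ pl ++ [',']) ++ [d] := by
    simp [h]
  rw [this, List.getLast?_concat]

-- ===== VERDICT (by name: the statement is the Claim_ definition above) =====
theorem encode_type14_spec : Claim_unchanged_encode_type14 := by
  intro mmsi text _ hpre hD
  obtain ⟨m, rfl⟩ := Int.eq_ofNat_of_zero_le hpre
  have hm : m < 2 ^ 30 := by
    unfold D_encode_type14 at hD
    by_contra h
    exact hD (by exact_mod_cast Nat.le_of_not_lt h)
  exact pvMain m text hm

theorem encode_type14_changed : Claim_changed_encode_type14 := by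
  unfold Claim_changed_encode_type14; decide

theorem encode_type14_tight : Claim_exact_encode_type14 := by
  intro mmsi text hdom hpre hD
  obtain ⟨m, rfl⟩ := Int.eq_ofNat_of_zero_le hpre
  unfold D_encode_type14 at hD
  unfold Dom_encode_type14 at hdom
  have hmlo : 2 ^ 30 ≤ m := by exact_mod_cast hD
  have hmhi : m ≤ 2 ^ 31 := by
    simp only [pvDomInt, Bool.and_eq_true, decide_eq_true_eq] at hdom
    exact_mod_cast hdom.1.2
  -- bit length of m is 31 or 32
  set w := PySem.Int.bitLength ((m : Nat) : Int) with hw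
  have hne0 : ((m : Nat) : Int) ≠ 0 := by positivity
  have hup := PySem.Int.lt_two_pow_bitLength ((m : Nat) : Int)
  have hlo := PySem.Int.two_pow_bitLength_le ((m : Nat) : Int) hne0
  rw [Int.natAbs_natCast] at hup hlo
  have hw31 : 31 ≤ w := by
    by_contra h
    have : m < 2 ^ 30 := lt_of_lt_of_le hup (Nat.pow_le_pow_right (by norm_num) (by omega))
    omega
  have hw32 : w ≤ 32 := by
    by_contra h
    have : 2 ^ 32 ≤ 2 ^ (w - 1) := Nat.pow_le_pow_right (by norm_num) (by omega)
    have := le_trans this hlo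
    have : (2 : Nat) ^ 31 < 2 ^ 32 := by norm_num
    omega
  have hfmt : (pvBinFmt 30 m).length = w := by
    rw [pvBinFmt_len 30 m (by omega)]; omega
  -- A's padding
  have hLa : (pvBinFmt 6 14 ++ ['0', '0'] ++ pvBinFmt 30 (((m : Nat) : Int)).toNat ++ ['0', '0']
      ++ pvAis6bitEncode text.toList).length = 10 + w + 6 * (PySem.Chars.upper text.toList).length := by
    have hH : pvBinFmt 6 14 ++ ['0', '0'] ++ pvBinFmt 30 (((m : Nat) : Int)).toNat ++ ['0', '0'] = pvHeader m := by
      simp [pvHeader]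
    rw [List.length_append, hH, (pvHeader_spec m).2, hfmt, pvEnc_len]
    ring
  -- B's bit count
  have hnb : ((PySem.Chars.upper text.toList).foldl
      (fun st ch => pvPush st (if 32 ≤ ch.toNat ∧ ch.toNat < 96 then ch.toNat % 64 else 0) 6)
      (pvPush (pvPush (pvPush (14, 6) 0 2) (PySem.Int.band ((m : Nat) : Int) 1073741823).toNat 30) 0 2)).2
      = 40 + 6 * (PySem.Chars.upper text.toList).length := by
    rw [pvFoldB_len]
    simp [pvPush]
  have hpad2 : (6 - (40 + 6 * (PySem.Chars.upper text.toList).length) % 6) % 6 = 2 := by omega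
  have hBlast : (encode_type14_alt ((m : Nat) : Int) text).toList.getLast? = some '2' := by
    simp only [encode_type14_alt, hnb, hpad2]
    apply pvLastChar
    decide
  intro heq
  rcases Nat.lt_or_ge w 32 with hcase | hcase
  · -- w = 31, A's padding = 1
    have h1 : (6 - (10 + w + 6 * (PySem.Chars.upper text.toList).length) % 6) % 6 = 1 := by omega
    have hAlast : (encode_type14 ((m : Nat) : Int) text).toList.getLast? = some '1' := by
      simp only [encode_type14, hLa, h1]
      apply pvLastChar
      decide
    rw [heq, hBlast] at hAlast
    exact absurd hAlast (by decide)
  · -- w = 32, A's padding = 0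
    have h0 : (6 - (10 + w + 6 * (PySem.Chars.upper text.toList).length) % 6) % 6 = 0 := by omega
    have hAlast : (encode_type14 ((m : Nat) : Int) text).toList.getLast? = some '0' := by
      simp only [encode_type14, hLa, h0]
      apply pvLastChar
      decide
    rw [heq, hBlast] at hAlast
    exact absurd hAlast (by decide)
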